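-- pv_equiv track=rewrite | github.com/vinchinzu/euler | python/830-b.py | S_mod_p3
-- ===== SOURCE A (Python) =====
-- import math
--
-- def binom_mod_prime_power_n_small_k(n: int, j: int, p: int, a: int = 3) -> int:
--     """
--     binom(n, j) modulo p^a, with n huge and j small (<= ~3p).
--     Uses p-adic factor tracking: split numerator and j! into p^e * unit.
--     """
--     m = p**a
--     # Numerator product U * p^E, where U is unit mod p^a (no p factors), E = total v_p
--     E = 0
--     U = 1 % m
--     for t in range(j):
--         x = n - t
--         v = 0
--         # extract p-adic valuation up to a
--         while v < a and x % p == 0: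
--             x //= p
--             v += 1
--         E += v
--         U = (U * (x % m)) % m
--
--     # Denominator j! = u * p^d (u is unit)
--     d = 0
--     u = 1 % m
--     for r in range(1, j + 1):
--         y = r
--         while y % p == 0:
--             y //= p
--             d += 1
--         u = (u * (y % m)) % m
--
--     inv_u = pow(u, -1, m)  # u is coprime to p, so invertible mod p^a
--     res = U * inv_u % m
--     res = (res * pow(p, E - d, m)) % m
--     return res
--
-- def S_mod_p3(n: int, p: int, a: int = 3) -> int:
--     """
--     S(n) modulo p^a (with a=3 here).
--     Truncates j at 3p-1 since v_p(j!) >= 3 for j >= 3p, so those terms vanish mod p^3.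
--     Uses: term_j = (sum_{i=0}^j (-1)^{j-i} C(j,i) i^n) * C(n,j) * 2^{n-j}
--     """
--     m = p**a
--     j_max = min(n, 3 * p - 1)
--     pow2n = pow(2, n, m)
--     total = 0
--     for j in range(0, j_max + 1):
--         # N_j = j! * S(n,j) = sum_{i=0}^j (-1)^{j-i} C(j,i) i^n
--         N = 0
--         for i in range(0, j + 1):
--             term = math.comb(j, i) * pow(i, n, m)
--             if (j - i) & 1:
--                 N = (N - term) % m
--             else:
--                 N = (N + term) % m
--
--         Cnj = binom_mod_prime_power_n_small_k(n, j, p, a)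
--         term_j = (N * Cnj) % m
--         # multiply by 2^{n-j} but reuse 2^n / 2^j
--         term_j = (term_j * (pow2n * pow(pow(2, j, m), -1, m) % m)) % m
--         total = (total + term_j) % m
--     return total
-- ===== SOURCE B (Python) =====
-- import math
--
-- def binom_mod_prime_power_n_small_k(n: int, j: int, p: int, a: int = 3) -> int:
--     """
--     binom(n, j) modulo p^a, with n huge and j small (<= ~3p).
--     Uses p-adic factor tracking: split numerator and j! into p^e * unit.
--     """
--     m = p**a
--     E = 0
--     U = 1 % m
--     for t in range(j):
--         x = n - t
--         v = 0
--         while v < a and x % p == 0: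
--             x //= p
--             v += 1
--         E += v
--         U = (U * (x % m)) % m
--     d = 0
--     u = 1 % m
--     for r in range(1, j + 1):
--         y = r
--         while y % p == 0:
--             y //= p
--             d += 1
--         u = (u * (y % m)) % m
--     inv_u = pow(u, -1, m)
--     res = U * inv_u % m
--     res = (res * pow(p, E - d, m)) % m
--     return res
--
-- def S_mod_p3(n: int, p: int, a: int = 3) -> int:
--     """
--     S(n) modulo p^a via a finite-difference table: N_j = j!*S(n,j) is the head
--     of the j-th forward-difference row of [i^n mod m], so no math.comb is needed;
--     2^(n-j) is computed directly (j <= n), so no modular inverses either.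
--     """
--     m = p ** a
--     j_max = min(n, 3 * p - 1)
--     row = [pow(i, n, m) for i in range(j_max + 1)]
--     total = 0
--     for j in range(j_max + 1):
--         t = row[0] * binom_mod_prime_power_n_small_k(n, j, p, a) % m
--         total = (total + t * pow(2, n - j, m)) % m
--         row = [(y - x) % m for x, y in zip(row, row[1:])]
--     return total
-- ===== Notes on version B (the rewrite author's own statement) =====
-- stated objective: faster
-- what changed: Each N_j = j!*S(n,j) is read off a forward-difference table of the precomputed row [i^n mod m] instead of A's inner signed binomial sum (no math.comb, no per-term pow), and 2^(n-j) is computed directly as pow(2, n-j, m) (j <= n) instead of multiplying 2^n by a modular inverse of 2^j; this trades binomial-coefficient arithmetic for repeated row differencing.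
-- outside the precondition, e.g. on S_mod_p3(1, 9, 1): A returns 1, B returns 1
import Mathlib
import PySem

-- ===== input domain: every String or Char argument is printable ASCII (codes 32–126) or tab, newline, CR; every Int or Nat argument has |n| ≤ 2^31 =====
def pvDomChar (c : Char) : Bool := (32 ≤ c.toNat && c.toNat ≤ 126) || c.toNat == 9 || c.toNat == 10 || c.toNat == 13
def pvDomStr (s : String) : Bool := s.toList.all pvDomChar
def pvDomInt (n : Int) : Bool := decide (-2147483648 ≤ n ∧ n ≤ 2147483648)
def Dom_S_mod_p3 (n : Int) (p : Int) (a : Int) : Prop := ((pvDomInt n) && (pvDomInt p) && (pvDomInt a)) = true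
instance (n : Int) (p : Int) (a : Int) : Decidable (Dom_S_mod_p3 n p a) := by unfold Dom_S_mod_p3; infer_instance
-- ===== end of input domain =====

-- B replaces A's inner binomial sum for N_j by a forward-difference table over the
-- precomputed row [i^n mod m] and computes 2^(n-j) directly instead of via a modular
-- inverse of 2^j, so the loop needs no math.comb and no per-term pow.

-- ===== shared helpers: ports of Python built-ins used by both sources =====

-- port of pow(x, -1, m) (modular inverse; where Python raises ValueError the value is junk,
-- such inputs are excluded by Pre_)
def pyInvMod (b m : Int) : Int :=
  let M : Nat := m.natAbs
  let u : Nat := (b % (M : Int)).toNat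
  PySem.Int.mod (Nat.gcdA u M) m

-- port of three-argument pow(b, e, m)
def pyPowMod (b e m : Int) : Int :=
  if 0 ≤ e then PySem.Int.mod (b ^ e.toNat) m
  else pyInvMod (b ^ e.natAbs) m

-- the helper's two strip-p-factors while loops (`while v < a and x % p == 0: x //= p; v += 1`
-- and `while y % p == 0: y //= p; d += 1`), returning (stripped value, division count).
-- The fuel is the `v < a` bound for the first loop (exact); for the second it is an upper
-- bound on the iteration count: y.natAbs + 1 suffices because each division shrinks |y| by
-- a factor >= 2 whenever the Python loop terminates (|p| >= 2); where the Python loop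
-- diverges or divides by zero the input is outside Pre_
def pDivLoop (p : Int) : Nat → Int → Int × Int
  | 0, x => (x, 0)
  | k+1, x =>
    if PySem.Int.mod x p = 0 then
      let r := pDivLoop p k (PySem.Int.floordiv x p)
      (r.1, r.2 + 1)
    else (x, 0)

-- port of binom_mod_prime_power_n_small_k (identical in Source A and Source B)
def binomHelper (n j p a : Int) : Int :=
  let m := p ^ a.toNat
  let s1 := (PySem.List.pyRange 0 j).foldl (fun (s : Int × Int) t =>
      let x := n - t
      let r := pDivLoop p a.toNat x
      (s.1 + r.2, PySem.Int.mod (s.2 * PySem.Int.mod r.1 m) m)) (0, PySem.Int.mod 1 m)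
  let s2 := (PySem.List.pyRange 1 (j + 1)).foldl (fun (s : Int × Int) r =>
      let w := pDivLoop p (r.natAbs + 1) r
      (s.1 + w.2, PySem.Int.mod (s.2 * PySem.Int.mod w.1 m) m)) (0, PySem.Int.mod 1 m)
  let invU := pyPowMod s2.2 (-1) m
  let res := PySem.Int.mod (s1.2 * invU) m
  PySem.Int.mod (res * pyPowMod p (s1.1 - s2.1) m) m

-- ===== PORT A =====
def S_mod_p3 (n : Int) (p : Int) (a : Int) : Int :=
  let m := p ^ a.toNat
  let jmax := min n (3 * p - 1)
  let pow2n := pyPowMod 2 n m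
  (PySem.List.pyRange 0 (jmax + 1)).foldl (fun total j =>
    let N := (PySem.List.pyRange 0 (j + 1)).foldl (fun N i =>
        let term := (Nat.choose j.toNat i.toNat : Int) * pyPowMod i n m
        if PySem.Int.band (j - i) 1 ≠ 0 then PySem.Int.mod (N - term) m
        else PySem.Int.mod (N + term) m) 0
    let Cnj := binomHelper n j p a
    let termj := PySem.Int.mod (N * Cnj) m
    let termj2 := PySem.Int.mod (termj * (PySem.Int.mod (pow2n * pyPowMod (pyPowMod 2 j m) (-1) m) m)) m
    PySem.Int.mod (total + termj2) m) 0

-- ===== PORT B =====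
def S_mod_p3_alt (n : Int) (p : Int) (a : Int) : Int :=
  let m := p ^ a.toNat
  let jmax := min n (3 * p - 1)
  let row0 := (PySem.List.pyRange 0 (jmax + 1)).map (fun i => pyPowMod i n m)
  ((PySem.List.pyRange 0 (jmax + 1)).foldl (fun (s : Int × List Int) j =>
    let t := PySem.Int.mod (PySem.List.pyGetD s.2 0 0 * binomHelper n j p a) m
    let total := PySem.Int.mod (s.1 + t * pyPowMod 2 (n - j) m) m
    (total, (s.2.zip (PySem.List.slice s.2 (some 1))).map
      (fun xy => PySem.Int.mod (xy.2 - xy.1) m))) (0, row0)).1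

-- ===== PRECONDITION & SPEC =====
-- Pre_ keeps the function's meaningful domain: n >= 0, a >= 0 and p an odd prime (the
-- helper's modular inverses are only guaranteed to exist for a prime-power modulus),
-- plus the degenerate regions where A's loop body is trivially safe (n < 0 or p <= 0,
-- where the loop is empty; n = 0; a = 0, i.e. m = 1). It excludes a < 0 (float modulus,
-- TypeError), p = 2 with n >= 1 (2^j is not invertible mod 2^a, ValueError) and composite
-- odd p, on which A raises ValueError as soon as some j reaches a unit sharing a factor
-- with p; on small n such a composite-p run happens to return (and B agrees there), but
-- that accidental inverse-existence set has no closed form.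
def Pre_S_mod_p3 (n : Int) (p : Int) (a : Int) : Prop :=
  0 ≤ a ∧
  ( (n < 0 ∧ (PySem.Int.mod p 2 ≠ 0 ∨ a = 0))
  ∨ (0 ≤ n ∧ p ≤ 0 ∧ (p ≠ 0 ∨ a = 0))
  ∨ (n = 0 ∧ 0 < p)
  ∨ (0 < n ∧ a = 0 ∧ 2 ≤ p)
  ∨ (0 < n ∧ 3 ≤ p ∧ Nat.Prime p.toNat) )
instance (n : Int) (p : Int) (a : Int) : Decidable (Pre_S_mod_p3 n p a) := by
  unfold Pre_S_mod_p3; infer_instance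

def pvWitness_S_mod_p3 : Int × Int × Int := (7, 3, 3)

def Spec_S_mod_p3 (n : Int) (p : Int) (a : Int) (out : Int) : Prop := out = S_mod_p3_alt n p a
instance (n : Int) (p : Int) (a : Int) (out : Int) : Decidable (Spec_S_mod_p3 n p a out) := by
  unfold Spec_S_mod_p3; infer_instance

-- ===== CLAIM (what is proved, stated in full; the proofs are below) =====
def Claim_equal_S_mod_p3 : Prop := ∀ (n : Int) (p : Int) (a : Int), Dom_S_mod_p3 n p a → Pre_S_mod_p3 n p a → Spec_S_mod_p3 n p a (S_mod_p3 n p a)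

-- ===== LEMMAS AND PROOFS =====

-- proof-side names for the quantities the two loops compute
def pvF (n m : Int) (k : ℕ) : Int := pyPowMod (k : Int) n m

def pvSgn (n m : Int) (j : ℕ) : Int :=
  ∑ k ∈ Finset.range (j + 1), (-1 : Int) ^ (j - k) * (Nat.choose j k : Int) * pvF n m k

-- the proof-side forward-difference step (B's row update, with Python's % spelled as emod)
def diffStepZ (m : Int) (l : List Int) : List Int :=
  (l.zip (l.drop 1)).map (fun xy => (xy.2 - xy.1) % m)

theorem pv_sum_map_range (n : ℕ) (f : ℕ → ℤ) :
    ((List.range n).map f).sum = ∑ k ∈ Finset.range n, f k := rfl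

theorem pv_gcd_emod_left (x m : Int) : Int.gcd (x % m) m = Int.gcd x m := by
  conv_rhs => rw [show x = x % m + x / m * m from (Int.emod_add_ediv_mul x m).symm]
  rw [Int.gcd_comm (x % m) m, Int.gcd_comm _ m]
  exact (Int.gcd_add_mul_right_right m (x % m) (x / m)).symm

theorem pv_cast_emod (m : Int) (hm : 0 < m) (x : Int) :
    ((x % m : Int) : ZMod m.toNat) = (x : ZMod m.toNat) := by
  rw [ZMod.intCast_eq_intCast_iff', Int.toNat_of_nonneg hm.le]
  exact Int.emod_emod x m

theorem pv_xgcd (u M : ℕ) (h : Nat.gcd u M = 1) :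
    ((Nat.gcdA u M : Int) : ZMod M) * (u : ZMod M) = 1 := by
  have hid := Nat.gcd_eq_gcd_ab u M
  rw [h] at hid
  have hz : ((1 : ℤ) : ZMod M) = ((u * Nat.gcdA u M + M * Nat.gcdB u M : ℤ) : ZMod M) := by
    rw [← hid]; norm_num
  push_cast at hz
  rw [ZMod.natCast_self] at hz
  simp at hz
  rw [mul_comm] at hz
  exact hz.symm

theorem pv_inv_mul_cast (m c : Int) (hm : 0 < m) (hc : Int.gcd c m = 1) :
    ((pyPowMod c (-1) m : Int) : ZMod m.toNat) * (c : ZMod m.toNat) = 1 := by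
  have hMa : m.natAbs = m.toNat := by omega
  have hMZ : ((m.natAbs : ℕ) : Int) = m := Int.natAbs_of_nonneg hm.le
  have hinv : pyPowMod c (-1) m
      = PySem.Int.mod (Nat.gcdA ((c % (m.natAbs : Int)).toNat) m.natAbs) m := by
    simp [pyPowMod, pyInvMod]
  set u : ℕ := (c % (m.natAbs : Int)).toNat with hu_def
  have hu : (u : Int) = c % m := by
    rw [hu_def, hMZ, Int.toNat_of_nonneg (Int.emod_nonneg c (ne_of_gt hm))]
  have hgcd1 : Nat.gcd u m.natAbs = 1 := by
    have h2 : Int.gcd (u : Int) ((m.natAbs : ℕ) : Int) = 1 := by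
      rw [hu, hMZ, pv_gcd_emod_left]; exact hc
    rwa [Int.gcd_natCast_natCast] at h2
  rw [hMa] at hinv hgcd1
  have hx := pv_xgcd u m.toNat hgcd1
  have hcu : ((u : ℕ) : ZMod m.toNat) = (c : ZMod m.toNat) := by
    have h3 : ((u : ℕ) : ZMod m.toNat) = (((u : ℤ)) : ZMod m.toNat) := by push_cast; rfl
    rw [h3, hu, pv_cast_emod m hm]
  rw [hinv, PySem.Int.mod_eq_emod_of_pos hm, pv_cast_emod m hm, ← hcu]
  exact hx

theorem pv_foldl_emod_add {α : Type} (m : Int) (g : α → Int) (l : List α) (x : Int) :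
    l.foldl (fun N i => (N + g i) % m) (x % m) = (x + (l.map g).sum) % m := by
  induction l generalizing x with
  | nil => simp
  | cons hd tl ih =>
      simp only [List.foldl_cons, List.map_cons, List.sum_cons]
      rw [Int.emod_add_emod, ih, add_assoc]

-- A's inner loop over i computes the signed binomial sum N_j, reduced mod m
theorem pv_innerN (m n : Int) (hm : 0 < m) (jn : ℕ) :
    (PySem.List.pyRange 0 ((jn : Int) + 1)).foldl (fun N i =>
        let term := (Nat.choose ((jn : Int)).toNat i.toNat : Int) * pyPowMod i n m
        if PySem.Int.band ((jn : Int) - i) 1 ≠ 0 then PySem.Int.mod (N - term) m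
        else PySem.Int.mod (N + term) m) 0
    = pvSgn n m jn % m := by
  have hcast : ((jn : Int) + 1) = (((jn + 1 : ℕ) : Int)) := by push_cast; ring
  rw [hcast, PySem.List.pyRange_zero_nat, List.foldl_map]
  have hcongr : ∀ (N : Int), ∀ k ∈ List.range (jn + 1),
      (fun (N : Int) (k : ℕ) =>
        let term := (Nat.choose ((jn : Int)).toNat ((k : Int)).toNat : Int) * pyPowMod (k : Int) n m
        if PySem.Int.band ((jn : Int) - (k : Int)) 1 ≠ 0 then PySem.Int.mod (N - term) m
        else PySem.Int.mod (N + term) m) N k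
      = (fun (N : Int) (k : ℕ) =>
          (N + (-1 : Int) ^ (jn - k) * (Nat.choose jn k : Int) * pvF n m k) % m) N k := by
    intro N k hk
    have hk' : k ≤ jn := by simpa [Nat.lt_succ_iff] using List.mem_range.mp hk
    simp only [Int.toNat_natCast]
    have hsub : (jn : Int) - (k : Int) = ((jn - k : ℕ) : Int) := by omega
    rw [hsub, PySem.Int.band_one]
    have hmod2 : PySem.Int.mod ((jn - k : ℕ) : Int) 2 = (((jn - k) % 2 : ℕ) : Int) := by
      exact_mod_cast PySem.Int.mod_natCast (jn - k) 2
    rw [hmod2]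
    rcases Nat.even_or_odd (jn - k) with he | ho
    · have h2 : (jn - k) % 2 = 0 := Nat.even_iff.mp he
      rw [h2]
      simp only [Nat.cast_zero, ne_eq, not_true_eq_false, if_false,
        PySem.Int.mod_eq_emod_of_pos hm, pvF]
      rw [Even.neg_one_pow he, one_mul]
    · have h2 : (jn - k) % 2 = 1 := Nat.odd_iff.mp ho
      rw [h2]
      simp only [Nat.cast_one, ne_eq, one_ne_zero, not_false_eq_true, if_true,
        PySem.Int.mod_eq_emod_of_pos hm, pvF]
      rw [Odd.neg_one_pow ho]
      congr 1
      ring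
  rw [PySem.List.foldl_congr_mem _ _ _ _ hcongr]
  have h0 : (0 : Int) = 0 % m := (Int.zero_emod m).symm
  rw [h0, pv_foldl_emod_add, pv_sum_map_range, zero_add, pvSgn]

theorem pv_sgn_fwd (n m : Int) (j : ℕ) :
    (fwdDiff 1)^[j] (pvF n m) 0 = pvSgn n m j := by
  rw [fwdDiff_iter_eq_sum_shift, pvSgn]
  refine Finset.sum_congr rfl fun k hk => ?_
  simp [mul_assoc]

theorem pv_diffStepZ_length (m : Int) (l : List Int) :
    (diffStepZ m l).length = l.length - 1 := by
  simp [diffStepZ]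

theorem pv_diffIter_length (m : Int) (l : List Int) (j : ℕ) :
    ((diffStepZ m)^[j] l).length = l.length - j := by
  induction j generalizing l with
  | zero => simp
  | succ k ih =>
      rw [Function.iterate_succ_apply', pv_diffStepZ_length, ih]
      omega

-- entries of the j-times-differenced row are the j-th integer forward differences, mod m
theorem pv_row_entries (m : Int) (F : ℕ → Int) (hcanon : ∀ k, F k % m = F k) (K : ℕ) :
    ∀ (j i : ℕ) (hi : i < ((diffStepZ m)^[j] ((List.range K).map F)).length),
    ((diffStepZ m)^[j] ((List.range K).map F))[i] = ((fwdDiff 1)^[j] F i) % m := by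
  intro j
  induction j with
  | zero =>
      intro i hi
      simp only [Function.iterate_zero_apply] at hi ⊢
      have hiK : i < K := by simpa using hi
      rw [List.getElem_map, List.getElem_range]
      exact (hcanon i).symm
  | succ jj ih =>
      intro i hi
      have hstep := Function.iterate_succ_apply' (diffStepZ m) jj ((List.range K).map F)
      have hi' : i < (diffStepZ m ((diffStepZ m)^[jj] ((List.range K).map F))).length := by
        rw [← hstep]; exact hi
      have hi1 : i + 1 < ((diffStepZ m)^[jj] ((List.range K).map F)).length := by
        rw [pv_diffStepZ_length] at hi'; omega
      have e1 := ih (1 + i) (by omega)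
      have e2 := ih i (by omega)
      rw [List.getElem_of_eq hstep hi]
      simp only [diffStepZ, List.getElem_map, List.getElem_zip, List.getElem_drop]
      simp only [e1, e2]
      rw [← Int.sub_emod]
      have hfd : fwdDiff 1 ((fwdDiff 1)^[jj] F) i
          = (fwdDiff 1)^[jj] F (i + 1) - (fwdDiff 1)^[jj] F i := by
        simp [fwdDiff]
      rw [show (fwdDiff 1)^[jj + 1] F = fwdDiff 1 ((fwdDiff 1)^[jj] F) from
        Function.iterate_succ_apply' _ _ _, hfd, Nat.add_comm 1 i]

theorem pv_step_total (m T t fA pw : Int) (hm : 0 < m) (hfp : fA % m = pw % m) :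
    PySem.Int.mod (T + PySem.Int.mod (t * fA) m) m = PySem.Int.mod (T + t * pw) m := by
  simp only [PySem.Int.mod_eq_emod_of_pos hm]
  have h1 : (t * fA) % m = (t * pw) % m := by
    rw [Int.mul_emod, hfp, ← Int.mul_emod]
  rw [Int.add_emod T, Int.emod_emod, h1, ← Int.emod_emod (t * pw) m, ← Int.add_emod T,
    Int.add_emod T (t * pw % m), Int.emod_emod, ← Int.add_emod]

theorem pv_factor (n m : Int) (hm : 0 < m) (hn : 0 ≤ n) (jn : ℕ) (hjn : (jn : Int) ≤ n)
    (hg : Int.gcd ((2 : Int) ^ jn) m = 1) :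
    (PySem.Int.mod (pyPowMod 2 n m * pyPowMod (pyPowMod 2 (jn : Int) m) (-1) m) m) % m
      = (pyPowMod 2 (n - (jn : Int)) m) % m := by
  have hMZ : ((m.toNat : ℕ) : Int) = m := Int.toNat_of_nonneg hm.le
  have hc2n : pyPowMod 2 n m = ((2 : Int) ^ n.toNat) % m := by
    unfold pyPowMod
    rw [if_pos hn, PySem.Int.mod_eq_emod_of_pos hm]
  have hc2j : pyPowMod 2 (jn : Int) m = ((2 : Int) ^ jn) % m := by
    unfold pyPowMod
    rw [if_pos (Int.natCast_nonneg jn), PySem.Int.mod_eq_emod_of_pos hm, Int.toNat_natCast]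
  have hc2nj : pyPowMod 2 (n - (jn : Int)) m = ((2 : Int) ^ (n - (jn : Int)).toNat) % m := by
    unfold pyPowMod
    rw [if_pos (show (0:Int) ≤ n - (jn : Int) by omega), PySem.Int.mod_eq_emod_of_pos hm]
  have hg' : Int.gcd (pyPowMod 2 (jn : Int) m) m = 1 := by
    rw [hc2j, pv_gcd_emod_left]; exact hg
  have hinv := pv_inv_mul_cast m _ hm hg'
  have hcj : ((pyPowMod 2 (jn : Int) m : Int) : ZMod m.toNat) = (2 : ZMod m.toNat) ^ jn := by
    rw [hc2j, pv_cast_emod m hm]; push_cast; ring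
  rw [hcj] at hinv
  have hexp : n.toNat = (n - (jn : Int)).toNat + jn := by omega
  have key : ((PySem.Int.mod (pyPowMod 2 n m * pyPowMod (pyPowMod 2 (jn : Int) m) (-1) m) m
      : Int) : ZMod m.toNat) = ((pyPowMod 2 (n - (jn : Int)) m : Int) : ZMod m.toNat) := by
    rw [PySem.Int.mod_eq_emod_of_pos hm, pv_cast_emod m hm, Int.cast_mul,
      hc2n, hc2nj, pv_cast_emod m hm, pv_cast_emod m hm]
    push_cast
    rw [hexp, pow_add, mul_assoc, mul_comm ((2 : ZMod m.toNat) ^ jn), hinv, mul_one]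
  have := (ZMod.intCast_eq_intCast_iff' _ _ m.toNat).mp key
  rwa [hMZ] at this

-- the heart: A's outer fold equals the total component of B's outer fold
theorem pv_core (n p a m jmax : Int) (hm : 0 < m) (hn : 0 ≤ n)
    (hjm : 0 ≤ jmax) (hjmn : jmax ≤ n)
    (hgcd : ∀ jn : ℕ, (jn : Int) ≤ jmax → Int.gcd ((2 : Int) ^ jn) m = 1) :
    (PySem.List.pyRange 0 (jmax + 1)).foldl
        (fun total j =>
          let N := (PySem.List.pyRange 0 (j + 1)).foldl (fun N i =>
              let term := (Nat.choose j.toNat i.toNat : Int) * pyPowMod i n m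
              if PySem.Int.band (j - i) 1 ≠ 0 then PySem.Int.mod (N - term) m
              else PySem.Int.mod (N + term) m) 0
          let Cnj := binomHelper n j p a
          let termj := PySem.Int.mod (N * Cnj) m
          let termj2 := PySem.Int.mod (termj *
            (PySem.Int.mod (pyPowMod 2 n m * pyPowMod (pyPowMod 2 j m) (-1) m) m)) m
          PySem.Int.mod (total + termj2) m) 0
      = ((PySem.List.pyRange 0 (jmax + 1)).foldl
          (fun (s : Int × List Int) j =>
            let t := PySem.Int.mod (PySem.List.pyGetD s.2 0 0 * binomHelper n j p a) m
            let total := PySem.Int.mod (s.1 + t * pyPowMod 2 (n - j) m) m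
            (total, (s.2.zip (PySem.List.slice s.2 (some 1))).map
              (fun xy => PySem.Int.mod (xy.2 - xy.1) m)))
          (0, (PySem.List.pyRange 0 (jmax + 1)).map (fun i => pyPowMod i n m))).1 := by
  obtain ⟨K, hK⟩ : ∃ K : ℕ, ((K : ℕ) : Int) = jmax + 1 :=
    ⟨(jmax + 1).toNat, Int.toNat_of_nonneg (by omega)⟩
  rw [← hK, PySem.List.pyRange_zero_nat, List.foldl_map, List.foldl_map, List.map_map]
  have hR0 : (List.range K).map ((fun i => pyPowMod i n m) ∘ fun k : ℕ => (k : Int))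
      = (List.range K).map (pvF n m) := rfl
  rw [hR0]
  have hcanon : ∀ k, pvF n m k % m = pvF n m k := by
    intro k
    simp [pvF, pyPowMod, hn, PySem.Int.mod_eq_emod_of_pos hm]
  have hlen0 : ((List.range K).map (pvF n m)).length = K := by simp
  suffices H : ∀ KK : ℕ, KK ≤ K →
      ((List.range KK).foldl
        (fun total (k : ℕ) =>
          let N := (PySem.List.pyRange 0 ((k : Int) + 1)).foldl (fun N i =>
              let term := (Nat.choose ((k : Int)).toNat i.toNat : Int) * pyPowMod i n m
              if PySem.Int.band ((k : Int) - i) 1 ≠ 0 then PySem.Int.mod (N - term) m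
              else PySem.Int.mod (N + term) m) 0
          let Cnj := binomHelper n (k : Int) p a
          let termj := PySem.Int.mod (N * Cnj) m
          let termj2 := PySem.Int.mod (termj *
            (PySem.Int.mod (pyPowMod 2 n m * pyPowMod (pyPowMod 2 (k : Int) m) (-1) m) m)) m
          PySem.Int.mod (total + termj2) m) 0
        = ((List.range KK).foldl
            (fun (s : Int × List Int) (k : ℕ) =>
              let t := PySem.Int.mod (PySem.List.pyGetD s.2 0 0 * binomHelper n (k : Int) p a) m
              let total := PySem.Int.mod (s.1 + t * pyPowMod 2 (n - (k : Int)) m) m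
              (total, (s.2.zip (PySem.List.slice s.2 (some 1))).map
                (fun xy => PySem.Int.mod (xy.2 - xy.1) m)))
            (0, (List.range K).map (pvF n m))).1)
      ∧ ((List.range KK).foldl
            (fun (s : Int × List Int) (k : ℕ) =>
              let t := PySem.Int.mod (PySem.List.pyGetD s.2 0 0 * binomHelper n (k : Int) p a) m
              let total := PySem.Int.mod (s.1 + t * pyPowMod 2 (n - (k : Int)) m) m
              (total, (s.2.zip (PySem.List.slice s.2 (some 1))).map
                (fun xy => PySem.Int.mod (xy.2 - xy.1) m)))
            (0, (List.range K).map (pvF n m))).2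
          = (diffStepZ m)^[KK] ((List.range K).map (pvF n m)) by
    exact (H K le_rfl).1
  intro KK
  induction KK with
  | zero => simp
  | succ q ih =>
      intro hq1
      obtain ⟨ih1, ih2⟩ := ih (by omega)
      have hqK : q < K := by omega
      have hqjm : (q : Int) ≤ jmax := by omega
      have hqn : (q : Int) ≤ n := by omega
      have hlenq : ((diffStepZ m)^[q] ((List.range K).map (pvF n m))).length = K - q := by
        rw [pv_diffIter_length, hlen0]
      rw [List.range_succ, List.foldl_append, List.foldl_append]
      simp only [List.foldl_cons, List.foldl_nil]
      rw [ih1, ih2]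
      -- name the state after q steps
      set TB := ((List.range q).foldl
            (fun (s : Int × List Int) (k : ℕ) =>
              let t := PySem.Int.mod (PySem.List.pyGetD s.2 0 0 * binomHelper n (k : Int) p a) m
              let total := PySem.Int.mod (s.1 + t * pyPowMod 2 (n - (k : Int)) m) m
              (total, (s.2.zip (PySem.List.slice s.2 (some 1))).map
                (fun xy => PySem.Int.mod (xy.2 - xy.1) m)))
            (0, (List.range K).map (pvF n m))).1 with hTB
      constructor
      · -- totals agree after one more step
        have hb : 0 < ((diffStepZ m)^[q] ((List.range K).map (pvF n m))).length := by
          rw [hlenq]; omega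
        have hrow0 := pv_row_entries m (pvF n m) hcanon K q 0 hb
        rw [pv_sgn_fwd] at hrow0
        have hget : PySem.List.pyGetD ((diffStepZ m)^[q] ((List.range K).map (pvF n m))) 0 0
            = pvSgn n m q % m := by
          rw [PySem.List.pyGetD_eq_getElem _ _ le_rfl (by exact_mod_cast hb)]
          simpa using hrow0
        simp only [pv_innerN m n hm q, hget]
        exact pv_step_total m TB _ _ _ hm (pv_factor n m hm hn q hqn (hgcd q hqjm))
      · -- rows: one more difference
        have hsl : ∀ xs : List Int, PySem.List.slice xs (some 1) = xs.drop 1 := fun xs => by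
          simpa using PySem.List.slice_from xs (by norm_num : (0:Int) ≤ 1)
        rw [Function.iterate_succ_apply']
        simp only [hsl, PySem.Int.mod_eq_emod_of_pos hm, diffStepZ]

-- ===== VERDICT (by name: the statement is the Claim_ definition above) =====
theorem S_mod_p3_spec : Claim_equal_S_mod_p3 := by
  intro n p a hdom hpre
  unfold Spec_S_mod_p3
  obtain ⟨ha, hcases⟩ := hpre
  by_cases hempty : min n (3 * p - 1) + 1 ≤ 0
  · simp [S_mod_p3, S_mod_p3_alt, PySem.List.pyRange_one_eq_nil hempty]
  · have hjm : 0 ≤ min n (3 * p - 1) := by omega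
    have hn : 0 ≤ n := le_trans hjm (min_le_left _ _)
    have hp : 1 ≤ p := by
      have := le_trans hjm (min_le_right _ _); omega
    have hm : 0 < p ^ a.toNat := pow_pos (by omega) _
    have hodd : Odd (p ^ a.toNat) ∨ n = 0 := by
      rcases hcases with ⟨hneg, _⟩ | ⟨_, hp0, _⟩ | ⟨h0, _⟩ | ⟨_, ha0, _⟩ | ⟨_, hp3, hprime⟩
      · omega
      · omega
      · right; exact h0
      · left; rw [ha0]; simp
      · left
        have hpodd : Odd p := by
          have h2 : p.toNat ≠ 2 := by omega
          have ho := Nat.Prime.odd_of_ne_two hprime h2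
          have hcast : ((p.toNat : ℕ) : Int) = p := Int.toNat_of_nonneg (by omega)
          rw [← hcast]; exact_mod_cast ho
        exact hpodd.pow
    have hgcd : ∀ jn : ℕ, (jn : Int) ≤ min n (3 * p - 1) →
        Int.gcd ((2 : Int) ^ jn) (p ^ a.toNat) = 1 := by
      intro jn hjn
      rcases hodd with hoddm | hn0
      · have h1 : Nat.Coprime 2 ((p ^ a.toNat).natAbs) :=
          Nat.coprime_two_left.mpr (Int.natAbs_odd.mpr hoddm)
        have h2 : Nat.Coprime (2 ^ jn) ((p ^ a.toNat).natAbs) := Nat.Coprime.pow_left jn h1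
        show Nat.gcd ((2 : Int) ^ jn).natAbs (p ^ a.toNat).natAbs = 1
        rw [Int.natAbs_pow]
        exact h2
      · have hjn0 : jn = 0 := by
          have h3 : min n (3 * p - 1) ≤ n := min_le_left _ _
          omega
        subst hjn0; simp [Int.one_gcd]
    have hcore := pv_core n p a (p ^ a.toNat) (min n (3 * p - 1)) hm hn hjm (min_le_left _ _) hgcd
    simpa only [S_mod_p3, S_mod_p3_alt] using hcore
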